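-- pv_equiv track=rewrite | github.com/fz7948/boosting-study | 정수빈/Programmers/test3.py | solution
-- ===== SOURCE A (Python) =====
-- def solution(foods):
--     total_sum = sum(foods)
--
--     # 전체 합이 3으로 나누어지지 않으면 세 등분 불가
--     if total_sum % 3 != 0:
--         return 0
--
--     target_sum = total_sum // 3
--     current_sum = 0
--     first_split_count = 0
--     result = 0
--
--     # 두 번째 분할 지점부터 세 번째 분할 지점까지 탐색
--     for i in range(len(foods) - 1):
--         current_sum += foods[i]
--
--         # 두 번째 구간을 찾았을 때, 첫 번째 구간의 개수를 추가
--         if current_sum == 2 * target_sum and i < len(foods) - 1: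
--             result += first_split_count
--
--         # 첫 번째 구간이 타겟 포만도일 때 카운트 증가
--         if current_sum == target_sum:
--             first_split_count += 1
--
--     return result
-- ===== SOURCE B (Python) =====
-- def solution(foods):
--     total = sum(foods)
--     if total % 3 != 0:
--         return 0
--     t = total // 3
--     prefix = []
--     s = 0
--     for x in foods[:-1]:
--         s += x
--         prefix.append(s)
--     # staged: collect candidate cut positions, then count ordered pairs
--     cuts1 = [i for i, p in enumerate(prefix) if p == t]
--     cuts2 = [j for j, p in enumerate(prefix) if p == 2 * t]
--     return sum(1 for i in cuts1 for j in cuts2 if i < j)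
-- ===== Notes on version B (the rewrite author's own statement) =====
-- stated objective: alternative
-- what changed: A streams once over the array, carrying a running counter of first-cut points and accumulating the answer inline; B works in stages: it materialises the prefix-sum list, extracts the two index lists of candidate first and second cut positions, and counts the ordered index pairs (i < j) between the two lists.
import Mathlib
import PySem

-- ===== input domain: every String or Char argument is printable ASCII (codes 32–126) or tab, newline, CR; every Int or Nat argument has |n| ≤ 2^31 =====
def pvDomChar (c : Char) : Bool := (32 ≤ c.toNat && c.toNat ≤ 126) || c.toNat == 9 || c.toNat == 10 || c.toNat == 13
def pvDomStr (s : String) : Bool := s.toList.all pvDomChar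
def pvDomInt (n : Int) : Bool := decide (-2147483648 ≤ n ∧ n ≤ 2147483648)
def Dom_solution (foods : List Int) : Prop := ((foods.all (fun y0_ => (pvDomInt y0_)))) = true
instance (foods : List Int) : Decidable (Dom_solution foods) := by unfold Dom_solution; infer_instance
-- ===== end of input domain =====

-- B replaces A's single streaming pass (running counter of first cut points, answer accumulated
-- inline) by a staged computation: build the prefix-sum list, extract the two index lists of
-- candidate first/second cut positions, and count the ordered index pairs (i < j) between them.

-- ===== PORT A =====
def solution (foods : List Int) : Int :=
  let total_sum := foods.sum
  if PySem.Int.mod total_sum 3 ≠ 0 then 0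
  else
    let target_sum := PySem.Int.floordiv total_sum 3
    let st :=
      (PySem.List.pyRange 0 ((foods.length : Int) - 1) 1).foldl
        (fun (s : Int × Int × Int) i =>
          let cur := s.1 + PySem.List.pyGetD foods i 0
          let res := if cur = 2 * target_sum ∧ i < (foods.length : Int) - 1 then s.2.2 + s.2.1 else s.2.2
          let fc := if cur = target_sum then s.2.1 + 1 else s.2.1
          (cur, fc, res))
        (0, 0, 0)
    st.2.2

-- ===== PORT B =====
def solution_alt (foods : List Int) : Int :=
  let total := foods.sum
  if PySem.Int.mod total 3 ≠ 0 then 0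
  else
    let t := PySem.Int.floordiv total 3
    let pre := ((PySem.List.slice foods none (some (-1))).foldl
        (fun (st : Int × List Int) x => (st.1 + x, st.2 ++ [st.1 + x])) (0, ([] : List Int))).2
    let cuts1 := ((PySem.List.enumerate pre).filter (fun ip => ip.2 == t)).map (·.1)
    let cuts2 := ((PySem.List.enumerate pre).filter (fun ip => ip.2 == 2 * t)).map (·.1)
    cuts1.foldl (fun acc i => cuts2.foldl (fun a j => if i < j then a + 1 else a) acc) 0

-- ===== PRECONDITION & SPEC =====
def Spec_solution (foods : List Int) (out : Int) : Prop := out = solution_alt foods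
instance (foods : List Int) (out : Int) : Decidable (Spec_solution foods out) := by unfold Spec_solution; infer_instance

-- ===== CLAIM (what is proved, stated in full; the proofs are below) =====
def Claim_equal_solution : Prop := ∀ (foods : List Int), Dom_solution foods → Spec_solution foods (solution foods)

-- ===== LEMMAS AND PROOFS =====

-- prefix sums of a list starting from s
def pfx (s : Int) : List Int → List Int
  | [] => []
  | x :: l => (s + x) :: pfx (s + x) l

-- A's loop, rephrased as a recursion over the prefix-sum list
def fF (t : Int) : List Int → Int → Int → Int
  | [], _, r => r
  | p :: l, c, r => fF t l (if p = t then c + 1 else c) (if p = 2 * t then r + c else r)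

-- pairsF t l = sum over positions p of l with p = t of the count of LATER 2*t entries
def pairsF (t : Int) : List Int → Int
  | [] => 0
  | p :: l => (if p = t then (l.countP (· == 2 * t) : Int) else 0) + pairsF t l

-- index positions (enumerating from s) of entries equal to v
def cutsE (v : Int) (l : List Int) (s : Int) : List Int :=
  ((PySem.List.enumerate l s).filter (fun ip => ip.2 == v)).map (·.1)

theorem pfx_build (ys : List Int) : ∀ (s : Int) (acc : List Int),
    (ys.foldl (fun (st : Int × List Int) x => (st.1 + x, st.2 ++ [st.1 + x])) (s, acc)).2
      = acc ++ pfx s ys := by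
  induction ys with
  | nil => intro s acc; simp [pfx]
  | cons x ys ih => intro s acc; simp [List.foldl, pfx, ih]

theorem fF_fold (t : Int) (ys : List Int) : ∀ (s c r : Int),
    (ys.foldl (fun (st : Int × Int × Int) x =>
        (st.1 + x, (if st.1 + x = t then st.2.1 + 1 else st.2.1),
          (if st.1 + x = 2 * t then st.2.2 + st.2.1 else st.2.2))) (s, c, r)).2.2
      = fF t (pfx s ys) c r := by
  induction ys with
  | nil => intro s c r; simp [pfx, fF]
  | cons x ys ih => intro s c r; simp only [List.foldl, pfx, fF]; rw [ih]

theorem fF_char (t : Int) (l : List Int) : ∀ (c r : Int),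
    fF t l c r = r + c * (l.countP (· == 2 * t) : Int) + pairsF t l := by
  induction l with
  | nil => intro c r; simp [fF, pairsF]
  | cons p l ih =>
      intro c r
      simp only [fF, pairsF, List.countP_cons, beq_iff_eq]
      rw [ih]
      split_ifs <;> push_cast <;> ring

theorem cutsE_cons (v p : Int) (l : List Int) (s : Int) :
    cutsE v (p :: l) s = (if p = v then [s] else []) ++ cutsE v l (s + 1) := by
  by_cases h : p = v <;> simp [cutsE, PySem.List.enumerate_cons, h]

theorem mem_cutsE_ge (v : Int) (l : List Int) (s i : Int) (h : i ∈ cutsE v l s) : s ≤ i := by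
  simp only [cutsE, List.mem_map, List.mem_filter] at h
  obtain ⟨ip, ⟨hm, _⟩, rfl⟩ := h
  obtain ⟨k, hk, rfl⟩ := (PySem.List.mem_enumerate_iff _ _ _).mp hm
  simp only
  omega

theorem cutsE_length (v : Int) (l : List Int) : ∀ (s : Int),
    (cutsE v l s).length = l.countP (· == v) := by
  induction l with
  | nil => intro s; simp [cutsE]
  | cons p l ih =>
      intro s
      rw [cutsE_cons]
      simp only [List.length_append, List.countP_cons, ih]
      by_cases h : p = v <;> simp [h] <;> omega

-- the pair count B computes over enumerate-from-s equals A's streamed pairsF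
theorem cutsE_pairs (t : Int) (l : List Int) : ∀ (s : Int),
    ((cutsE t l s).map
        (fun i => ((cutsE (2 * t) l s).countP (fun j => i < j) : Int))).sum = pairsF t l := by
  induction l with
  | nil => intro s; simp [cutsE, pairsF]
  | cons p l ih =>
      intro s
      rw [cutsE_cons, cutsE_cons, List.map_append, List.sum_append, pairsF]
      have htail : ∀ i ∈ cutsE t l (s + 1),
          (((if p = 2 * t then [s] else []) ++ cutsE (2 * t) l (s + 1)).countP (fun j => i < j) : Int)
            = ((cutsE (2 * t) l (s + 1)).countP (fun j => i < j) : Int) := by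
        intro i hi
        have hsi : s + 1 ≤ i := mem_cutsE_ge t l (s + 1) i hi
        rw [List.countP_append]
        have : (if p = 2 * t then [s] else []).countP (fun j => i < j) = 0 := by
          split_ifs <;> simp <;> omega
        omega
      rw [List.map_congr_left htail, ih]
      congr 1
      by_cases h1 : p = t
      · rw [if_pos h1, if_pos h1]
        simp only [List.map_cons, List.map_nil, List.sum_cons, List.sum_nil,
          List.countP_append, add_zero]
        have hall : (cutsE (2 * t) l (s + 1)).countP (fun j => decide (s < j))
            = (cutsE (2 * t) l (s + 1)).length := by
          rw [List.countP_eq_length]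
          intro j hj
          have := mem_cutsE_ge (2 * t) l (s + 1) j hj
          simp only [decide_eq_true_eq]; omega
        have hhead : (if p = 2 * t then [s] else ([] : List Int)).countP (fun j => decide (s < j)) = 0 := by
          by_cases h2 : p = 2 * t <;> simp [h2]
        rw [hhead, hall, cutsE_length]
        simp
      · simp [h1]

-- the index range of A's loop equals the index range over foods.dropLast
theorem range_len_sub_one (foods : List Int) :
    PySem.List.pyRange 0 ((foods.length : Int) - 1) 1
      = PySem.List.pyRange 0 ((foods.dropLast.length : Int)) 1 := by
  rw [PySem.List.pyRange_one, PySem.List.pyRange_one]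
  congr 2
  simp only [List.length_dropLast]
  omega

theorem pyGetD_dropLast (foods : List Int) (i : Int)
    (h : i ∈ PySem.List.pyRange 0 ((foods.dropLast.length : Int)) 1) :
    PySem.List.pyGetD foods i 0 = PySem.List.pyGetD foods.dropLast i 0 := by
  rw [PySem.List.mem_pyRange_one] at h
  obtain ⟨h0, h1⟩ := h
  have hi : i.toNat < foods.dropLast.length := by omega
  have hi' : i.toNat < foods.length := by
    simp only [List.length_dropLast] at hi; omega
  rw [PySem.List.pyGetD_of_nonneg foods 0 h0, PySem.List.pyGetD_of_nonneg foods.dropLast 0 h0]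
  rw [List.getD_eq_getElem?_getD, List.getD_eq_getElem?_getD,
    List.getElem?_eq_getElem hi, List.getElem?_eq_getElem hi']
  simp [List.getElem_dropLast]

-- ===== VERDICT (by name: the statement is the Claim_ definition above) =====
theorem solution_spec : Claim_equal_solution := by
  intro foods _
  unfold Spec_solution solution solution_alt
  dsimp only
  by_cases hdvd : (3 : Int) ∣ foods.sum
  · rw [if_neg (by simp [hdvd]), if_neg (by simp [hdvd])]
    set t := PySem.Int.floordiv foods.sum 3 with ht
    -- B side: prefix list, then nested pair counting
    rw [PySem.List.slice_to_neg_one, pfx_build, List.nil_append]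
    have hinner : ∀ (init : Int) (i : Int) (c2 : List Int),
        c2.foldl (fun a j => if i < j then a + 1 else a) init
          = init + (c2.countP (fun j => i < j) : Int) := by
      intro init i c2
      exact PySem.List.foldl_ite_add_one (fun j => i < j) c2 init
    rw [PySem.List.foldl_congr_mem _ _
          (fun acc i => acc +
            (((((PySem.List.enumerate (pfx 0 foods.dropLast)).filter
                (fun ip => ip.2 == 2 * t)).map (·.1)).countP (fun j => i < j) : Nat) : Int))
          _ (by intro acc i _; exact hinner acc i _)]
    rw [PySem.List.foldl_add]
    -- A side: replace the range bound, drop the redundant bound test, read off prefix sums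
    rw [range_len_sub_one]
    rw [PySem.List.foldl_congr_mem _ _
          (fun (st : Int × Int × Int) x =>
            (st.1 + PySem.List.pyGetD foods.dropLast x 0,
              (if st.1 + PySem.List.pyGetD foods.dropLast x 0 = t then st.2.1 + 1 else st.2.1),
              (if st.1 + PySem.List.pyGetD foods.dropLast x 0 = 2 * t then st.2.2 + st.2.1 else st.2.2)))
          _
          (by
            intro acc x hx
            have hxr := PySem.List.mem_pyRange_one.mp hx
            have hlen : foods.dropLast.length = foods.length - 1 := List.length_dropLast
            have hb : x < (foods.length : Int) - 1 := by omega
            rw [pyGetD_dropLast foods x hx]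
            simp [hb])]
    rw [PySem.List.foldl_pyRange_zero_pyGetD' foods.dropLast 0
          (fun (st : Int × Int × Int) v =>
            (st.1 + v, (if st.1 + v = t then st.2.1 + 1 else st.2.1),
              (if st.1 + v = 2 * t then st.2.2 + st.2.1 else st.2.2))) (0, 0, 0)]
    rw [fF_fold, fF_char]
    rw [← cutsE_pairs t (pfx 0 foods.dropLast) 0]
    simp [cutsE]
  · have hm : PySem.Int.mod foods.sum 3 ≠ 0 := fun h => hdvd ((PySem.Int.mod_eq_zero_iff_dvd _ _).mp h)
    rw [if_pos hm, if_pos hm]
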